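-- pv_equiv track=rewrite | github.com/zqkng/HaMMlet | shakespeare_tokenizer.py | fix_sentence_mechanics
-- ===== SOURCE A (Python) =====
-- def fix_sentence_mechanics(line):
--     # Capitalize the first word.
--     words = line.split(' ')
--     words[0] = words[0].capitalize()
--
--     # Capitalize the word 'I'.
--     for i in range(len(words)):
--         if words[i] == 'i':
--             words[i] = 'I'
--
--     # Capitalize the first word of sentences.
--     for i in range(len(words)-1, 0, -1):
--         prev = words[i-1]
--         if prev[-1] in ['!', '.', '?']:
--             words[i] = words[i].capitalize()
--
--     return ' '.join(words)
-- ===== SOURCE B (Python) =====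
-- def fix_sentence_mechanics(line):
--     # Partition the words into sentence groups, then fix each group independently.
--     groups = []
--     cur = []
--     for w in line.split(' '):
--         cur.append(w)
--         if w[-1:] in ('!', '.', '?'):
--             groups.append(cur)
--             cur = []
--     if cur:
--         groups.append(cur)
--     return ' '.join(' '.join(_fix_group(g)) for g in groups)
--
-- def _fix_group(g):
--     g = ['I' if w == 'i' else w for w in g]
--     g[0] = g[0].capitalize()
--     return g
-- ===== Notes on version B (the rewrite author's own statement) =====
-- stated objective: alternative
-- what changed: Instead of A's three indexed mutation passes over a flat word list with predecessor lookups, B partitions the words into sentence groups (split after each word ending in !, . or ?) and fixes each group independently (substitute 'i', capitalize the group head), then rejoins.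
import Mathlib
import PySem

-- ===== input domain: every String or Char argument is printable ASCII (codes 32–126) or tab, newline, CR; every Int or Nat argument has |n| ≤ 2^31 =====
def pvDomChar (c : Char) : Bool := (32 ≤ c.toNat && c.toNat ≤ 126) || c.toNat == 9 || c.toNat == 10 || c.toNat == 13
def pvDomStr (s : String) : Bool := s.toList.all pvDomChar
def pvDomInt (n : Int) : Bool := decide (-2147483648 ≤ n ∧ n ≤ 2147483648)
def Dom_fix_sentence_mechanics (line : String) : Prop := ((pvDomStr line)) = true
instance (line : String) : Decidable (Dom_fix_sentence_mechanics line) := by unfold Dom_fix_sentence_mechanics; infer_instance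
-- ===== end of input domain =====

-- B partitions the words into sentence groups and fixes each group independently, instead of
-- A's three indexed mutation passes (objective: alternative decomposition, same cost).
-- Equivalence of return values is proved on Pre_ (inputs where the Python A returns).

-- shared helper: str.capitalize(); exact on the ASCII domain Dom (ASCII title-case = upper-case)
def pvCap (w : String) : String :=
  match w.toList with
  | [] => ""
  | c :: rest => String.ofList (PySem.Chars.upperChar c :: PySem.Chars.lower rest)

-- shared helper: the test  c in ['!', '.', '?']  on a single character
def pvPunctC (c : Char) : Bool := c == '!' || c == '.' || c == '?'

-- ===== PORT A =====
-- one iteration of A's backward loop body at index i (i ≥ 1): prev = words[i-1]; the `none`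
-- branch is Python's IndexError on prev == '' (excluded by Pre_)
def pvStep (ws : List String) (i : Nat) : List String :=
  match PySem.Str.pyGet? (ws.getD (i - 1) "") (-1) with
  | some c => if pvPunctC c then ws.set i (pvCap (ws.getD i "")) else ws
  | none => ws

-- A's `for i in range(len(words)-1, 0, -1)` as the obvious descending structural recursion
def pvLoop3 : List String → Nat → List String
  | ws, 0 => ws
  | ws, (j + 1) => pvLoop3 (pvStep ws (j + 1)) j

def pvAList (ws0 : List String) : List String :=
  let ws1 := match ws0 with | [] => [] | w :: rest => pvCap w :: rest
  let ws2 := ws1.map (fun w => if w == "i" then "I" else w)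
  pvLoop3 ws2 (ws2.length - 1)

def fix_sentence_mechanics (line : String) : String :=
  PySem.Str.join " " (pvAList ((PySem.Str.split? line " ").getD []))

-- ===== PORT B =====
-- B's  'I' if w == 'i' else w
def pvIfix (w : String) : String := if w == "i" then "I" else w

-- B's  w[-1:] in ('!', '.', '?')  — a slice, so it never raises
def pvEnds (w : String) : Bool :=
  let t := PySem.Str.slice w (some (-1)) none
  t == "!" || t == "." || t == "?"

-- B's grouping loop: cur accumulates words; a group is flushed after a word ending in !, . or ?;
-- the pending cur is appended at the end only if nonempty
def pvGroups : List String → List String → List (List String)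
  | [], cur => if cur.isEmpty then [] else [cur]
  | w :: rest, cur =>
      if pvEnds w then (cur ++ [w]) :: pvGroups rest [] else pvGroups rest (cur ++ [w])

-- B's _fix_group: substitute 'i' everywhere, capitalize the head
def pvFixGroup (g : List String) : List String :=
  match g.map pvIfix with
  | [] => []
  | h :: t => pvCap h :: t

def fix_sentence_mechanics_alt (line : String) : String :=
  PySem.Str.join " "
    ((pvGroups ((PySem.Str.split? line " ").getD []) []).map
      (fun g => PySem.Str.join " " (pvFixGroup g)))

-- ===== PRECONDITION & SPEC =====
-- Pre_: every word except the last is nonempty (A raises IndexError on prev[-1] otherwise) —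
-- i.e. exactly the inputs where the Python A returns.
def Pre_fix_sentence_mechanics (line : String) : Prop :=
  ∀ w ∈ ((PySem.Str.split? line " ").getD []).dropLast, w ≠ ""
instance (line : String) : Decidable (Pre_fix_sentence_mechanics line) := by
  unfold Pre_fix_sentence_mechanics; infer_instance

def pvWitness_fix_sentence_mechanics : String := "hello there. i won! ok"

def Spec_fix_sentence_mechanics (line : String) (out : String) : Prop := out = fix_sentence_mechanics_alt line
instance (line : String) (out : String) : Decidable (Spec_fix_sentence_mechanics line out) := by unfold Spec_fix_sentence_mechanics; infer_instance

-- ===== CLAIM (what is proved, stated in full; the proofs are below) =====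
def Claim_equal_fix_sentence_mechanics : Prop := ∀ (line : String), Dom_fix_sentence_mechanics line → Pre_fix_sentence_mechanics line → Spec_fix_sentence_mechanics line (fix_sentence_mechanics line)

-- ===== LEMMAS AND PROOFS =====

-- A-side test  prev[-1] in ['!', '.', '?']  (proof helper; `none` = empty word)
def pvPunct (w : String) : Bool :=
  match PySem.Str.pyGet? w (-1) with
  | some c => pvPunctC c
  | none => false

lemma pvBeq_false_of_toNat_ne (c d : Char) (h : c.toNat ≠ d.toNat) : (c == d) = false := by
  rw [beq_eq_false_iff_ne]; rintro rfl; exact h rfl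

lemma pvPunctC_upperChar (c : Char) : pvPunctC (PySem.Chars.upperChar c) = pvPunctC c := by
  unfold PySem.Chars.upperChar
  by_cases h : PySem.Chars.islower c = true
  · rw [if_pos h]
    have hb : 97 ≤ c.toNat ∧ c.toNat ≤ 122 := by
      simp only [PySem.Chars.islower, Bool.and_eq_true, decide_eq_true_eq, Char.le_def] at h
      exact ⟨UInt32.le_iff_toNat_le.mp h.1, UInt32.le_iff_toNat_le.mp h.2⟩
    have ht : (Char.ofNat (c.toNat - 32)).toNat = c.toNat - 32 := by
      rw [Char.toNat_ofNat, if_pos]; exact Or.inl (by omega)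
    have h1 : ((Char.ofNat (c.toNat - 32)) == '!') = false :=
      pvBeq_false_of_toNat_ne _ _ (by rw [ht, show ('!').toNat = 33 from rfl]; omega)
    have h2 : ((Char.ofNat (c.toNat - 32)) == '.') = false :=
      pvBeq_false_of_toNat_ne _ _ (by rw [ht, show ('.').toNat = 46 from rfl]; omega)
    have h3 : ((Char.ofNat (c.toNat - 32)) == '?') = false :=
      pvBeq_false_of_toNat_ne _ _ (by rw [ht, show ('?').toNat = 63 from rfl]; omega)
    have g1 : (c == '!') = false :=
      pvBeq_false_of_toNat_ne _ _ (by rw [show ('!').toNat = 33 from rfl]; omega)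
    have g2 : (c == '.') = false :=
      pvBeq_false_of_toNat_ne _ _ (by rw [show ('.').toNat = 46 from rfl]; omega)
    have g3 : (c == '?') = false :=
      pvBeq_false_of_toNat_ne _ _ (by rw [show ('?').toNat = 63 from rfl]; omega)
    simp [pvPunctC, h1, h2, h3, g1, g2, g3]
  · rw [if_neg h]

lemma pvPunctC_lowerChar (c : Char) : pvPunctC (PySem.Chars.lowerChar c) = pvPunctC c := by
  unfold PySem.Chars.lowerChar
  by_cases h : PySem.Chars.isupper c = true
  · rw [if_pos h]
    have hb : 65 ≤ c.toNat ∧ c.toNat ≤ 90 := by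
      simp only [PySem.Chars.isupper, Bool.and_eq_true, decide_eq_true_eq, Char.le_def] at h
      exact ⟨UInt32.le_iff_toNat_le.mp h.1, UInt32.le_iff_toNat_le.mp h.2⟩
    have ht : (Char.ofNat (c.toNat + 32)).toNat = c.toNat + 32 := by
      rw [Char.toNat_ofNat, if_pos]; exact Or.inl (by omega)
    have h1 : ((Char.ofNat (c.toNat + 32)) == '!') = false :=
      pvBeq_false_of_toNat_ne _ _ (by rw [ht, show ('!').toNat = 33 from rfl]; omega)
    have h2 : ((Char.ofNat (c.toNat + 32)) == '.') = false :=
      pvBeq_false_of_toNat_ne _ _ (by rw [ht, show ('.').toNat = 46 from rfl]; omega)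
    have h3 : ((Char.ofNat (c.toNat + 32)) == '?') = false :=
      pvBeq_false_of_toNat_ne _ _ (by rw [ht, show ('?').toNat = 63 from rfl]; omega)
    have g1 : (c == '!') = false :=
      pvBeq_false_of_toNat_ne _ _ (by rw [show ('!').toNat = 33 from rfl]; omega)
    have g2 : (c == '.') = false :=
      pvBeq_false_of_toNat_ne _ _ (by rw [show ('.').toNat = 46 from rfl]; omega)
    have g3 : (c == '?') = false :=
      pvBeq_false_of_toNat_ne _ _ (by rw [show ('?').toNat = 63 from rfl]; omega)
    simp [pvPunctC, h1, h2, h3, g1, g2, g3]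
  · rw [if_neg h]

lemma pvUpperChar_ne_i (c : Char) : PySem.Chars.upperChar c ≠ 'i' := by
  unfold PySem.Chars.upperChar
  by_cases h : PySem.Chars.islower c = true
  · rw [if_pos h]
    have hb : 97 ≤ c.toNat ∧ c.toNat ≤ 122 := by
      simp only [PySem.Chars.islower, Bool.and_eq_true, decide_eq_true_eq, Char.le_def] at h
      exact ⟨UInt32.le_iff_toNat_le.mp h.1, UInt32.le_iff_toNat_le.mp h.2⟩
    have ht : (Char.ofNat (c.toNat - 32)).toNat = c.toNat - 32 := by
      rw [Char.toNat_ofNat, if_pos]; exact Or.inl (by omega)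
    intro he
    have : (Char.ofNat (c.toNat - 32)).toNat = (105 : Nat) := by rw [he]; rfl
    omega
  · rw [if_neg h]
    intro he; subst he; exact h (by decide)

lemma pvPunct_toList (w : String) :
    pvPunct w = match w.toList.getLast? with | some c => pvPunctC c | none => false := by
  unfold pvPunct
  rw [PySem.Str.pyGet?_eq, PySem.Chars.pyGet?_eq_listPyGet?, PySem.List.pyGet?_neg_one]

lemma pvCap_toList (w : String) :
    (pvCap w).toList = match w.toList with
      | [] => []
      | c :: rest => PySem.Chars.upperChar c :: PySem.Chars.lower rest := by
  unfold pvCap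
  cases w.toList <;> simp

lemma pvPunct_pvCap (w : String) : pvPunct (pvCap w) = pvPunct w := by
  rw [pvPunct_toList, pvPunct_toList, pvCap_toList]
  cases hw : w.toList with
  | nil => rfl
  | cons c rest =>
    cases rest with
    | nil => simp [PySem.Chars.lower, pvPunctC_upperChar]
    | cons r rs =>
      simp only [PySem.Chars.lower, List.map_cons, List.getLast?_cons_cons]
      rw [show (PySem.Chars.lowerChar r :: List.map PySem.Chars.lowerChar rs)
            = List.map PySem.Chars.lowerChar (r :: rs) from rfl,
          List.getLast?_map]
      cases hgl : (r :: rs).getLast? with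
      | none => rfl
      | some l => simp [pvPunctC_lowerChar]

lemma pvPunct_fixI (w : String) : pvPunct (if w == "i" then "I" else w) = pvPunct w := by
  by_cases h : (w == "i") = true
  · have : w = "i" := by exact eq_of_beq h
    subst this; decide
  · simp [h]

lemma pvCap_ne_i (w : String) : (pvCap w == "i") = false := by
  rw [beq_eq_false_iff_ne]
  intro he
  have hl := congrArg String.toList he
  rw [pvCap_toList] at hl
  cases hw : w.toList with
  | nil => rw [hw] at hl; exact absurd hl (by decide)
  | cons c rest =>
    rw [hw] at hl
    simp only [show ("i" : String).toList = ['i'] from rfl, List.cons.injEq] at hl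
    exact pvUpperChar_ne_i c hl.1

lemma pvCap_fixI (w : String) :
    (fun w => if w == "i" then "I" else w) (pvCap w) = pvCap (if w == "i" then "I" else w) := by
  by_cases h : (w == "i") = true
  · have : w = "i" := by exact eq_of_beq h
    subst this; decide
  · simp only [h, if_neg, Bool.false_eq_true, not_false_iff, pvCap_ne_i]

lemma pvStep_eq (ws : List String) (i : Nat) :
    pvStep ws i = if pvPunct (ws.getD (i - 1) "") = true
      then ws.set i (pvCap (ws.getD i "")) else ws := by
  unfold pvStep pvPunct
  cases PySem.Str.pyGet? (ws.getD (i - 1) "") (-1) with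
  | none => simp
  | some c => by_cases h : pvPunctC c = true <;> simp [h]

lemma pvLoop3_eq (i : Nat) : ∀ ws : List String, i < ws.length →
    pvLoop3 ws i = ws.mapIdx (fun j w =>
      if 1 ≤ j ∧ j ≤ i ∧ pvPunct (ws.getD (j - 1) "") = true then pvCap w else w) := by
  induction i with
  | zero =>
    intro ws _
    show ws = _
    apply List.ext_getElem
    · simp
    intro j hj1 hj2
    rw [List.getElem_mapIdx, if_neg (by rintro ⟨a, b, -⟩; omega)]
  | succ i ih =>
    intro ws hlen
    show pvLoop3 (pvStep ws (i + 1)) i = _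
    rw [pvStep_eq]
    simp only [Nat.add_sub_cancel]
    by_cases hp : pvPunct (ws.getD i "") = true
    · rw [if_pos hp, ih (ws.set (i + 1) (pvCap (ws.getD (i + 1) ""))) (by simp; omega)]
      apply List.ext_getElem
      · simp
      intro j hj1 hj2
      have hjw : j < ws.length := by simpa using hj1
      rw [List.getElem_mapIdx, List.getElem_mapIdx]
      by_cases hj : j = i + 1
      · subst hj
        rw [if_neg (by rintro ⟨-, b, -⟩; omega),
            if_pos ⟨by omega, by omega, by rw [Nat.add_sub_cancel]; exact hp⟩,
            List.getElem_set, if_pos rfl, List.getD_eq_getElem ws "" hjw]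
      · by_cases hc : 1 ≤ j ∧ j ≤ i
        · have hgd : (ws.set (i + 1) (pvCap (ws.getD (i + 1) ""))).getD (j - 1) ""
              = ws.getD (j - 1) "" := by
            rw [List.getD_eq_getElem?_getD, List.getElem?_set_ne (by omega),
                ← List.getD_eq_getElem?_getD]
          have hel : (ws.set (i + 1) (pvCap (ws.getD (i + 1) "")))[j]'(by simpa using hjw)
              = ws[j]'hjw := by
            rw [List.getElem_set, if_neg (by omega)]
          have hiff : (1 ≤ j ∧ j ≤ i ∧ pvPunct (ws.getD (j - 1) "") = true)
              ↔ (1 ≤ j ∧ j ≤ i + 1 ∧ pvPunct (ws.getD (j - 1) "") = true) := by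
            constructor <;> (rintro ⟨a, b, c⟩; exact ⟨a, by omega, c⟩)
          rw [hgd, hel, if_congr hiff rfl rfl]
        · rw [if_neg (fun h => hc ⟨h.1, h.2.1⟩),
              if_neg (by rintro ⟨a, b, -⟩; exact hc ⟨a, by omega⟩),
              List.getElem_set, if_neg (by omega)]
    · rw [if_neg hp, ih ws (by omega)]
      apply List.ext_getElem
      · simp
      intro j hj1 hj2
      rw [List.getElem_mapIdx, List.getElem_mapIdx]
      by_cases hj : j = i + 1
      · subst hj
        rw [if_neg (by rintro ⟨-, b, -⟩; omega),
            if_neg (by rintro ⟨-, -, hc⟩; rw [Nat.add_sub_cancel] at hc; exact hp hc)]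
      · have hiff : (1 ≤ j ∧ j ≤ i ∧ pvPunct (ws.getD (j - 1) "") = true)
            ↔ (1 ≤ j ∧ j ≤ i + 1 ∧ pvPunct (ws.getD (j - 1) "") = true) := by
          constructor <;> (rintro ⟨a, b, c⟩; exact ⟨a, by omega, c⟩)
        rw [if_congr hiff rfl rfl]

-- A's word list in pure zip-over-flags form (proof-side middle point between A and B)
def pvMid (ws : List String) : List String :=
  (ws.zip (true :: ws.dropLast.map pvPunct)).map
    (fun p => (fun w => if p.2 then pvCap w else w) (if p.1 == "i" then "I" else p.1))

lemma pvAList_eq_pvMid (ws : List String) : pvAList ws = pvMid ws := by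
  cases ws with
  | nil => rfl
  | cons w rest =>
    unfold pvAList pvMid
    show pvLoop3 ((pvCap w :: rest).map (fun w => if w == "i" then "I" else w))
        (((pvCap w :: rest).map (fun w => if w == "i" then "I" else w)).length - 1) = _
    rw [pvLoop3_eq _ _ (by simp)]
    simp only [List.length_map, List.length_cons, Nat.add_sub_cancel]
    apply List.ext_getElem
    · simp [List.length_zip, List.length_dropLast]
    intro j hj1 hj2
    have hjn : j < rest.length + 1 := by simpa using hj1
    rw [List.getElem_mapIdx]
    conv_rhs => rw [List.getElem_map, List.getElem_zip]
    cases j with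
    | zero =>
      rw [if_neg (by rintro ⟨a, -, -⟩; omega)]
      simp only [List.getElem_map, List.getElem_cons_zero, if_true]
      exact pvCap_fixI w
    | succ k =>
      have hk : k < rest.length := by omega
      have hpunct : pvPunct (((pvCap w :: rest).map
            (fun w => if w == "i" then "I" else w)).getD (k + 1 - 1) "")
          = pvPunct ((w :: rest)[k]'(by simp; omega)) := by
        rw [Nat.add_sub_cancel, List.getD_eq_getElem _ _ (by simp; omega), List.getElem_map,
            pvPunct_fixI]
        cases k with
        | zero => simp [pvPunct_pvCap]
        | succ m => simp
      rw [hpunct]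
      have hstart : (true :: (w :: rest).dropLast.map pvPunct)[k + 1]'(by simp; omega)
          = pvPunct ((w :: rest)[k]'(by simp; omega)) := by
        rw [List.getElem_cons_succ, List.getElem_map, List.getElem_dropLast]
      rw [hstart]
      simp only [List.getElem_map, List.getElem_cons_succ]
      by_cases hq : pvPunct ((w :: rest)[k]'(by simp; omega)) = true
      · rw [if_pos ⟨by omega, by omega, hq⟩]
        simp [hq]
      · rw [if_neg (by rintro ⟨-, -, hc⟩; exact hq hc)]
        simp [hq]

-- B's slice-based test agrees with the indexing-based test on every string
lemma pvEnds_eq (w : String) : pvEnds w = pvPunct w := by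
  have hofbeq : ∀ (c d : Char), (String.ofList [c] == String.ofList [d]) = (c == d) := by
    intro c d
    by_cases h : c = d
    · subst h; simp
    · rw [beq_eq_false_iff_ne.mpr h, beq_eq_false_iff_ne]
      intro he
      have := congrArg String.toList he
      simp at this
      exact h this
  unfold pvEnds PySem.Str.slice
  rw [pvPunct_toList]
  rcases List.eq_nil_or_concat w.toList with hw | ⟨l, c, hw⟩
  · rw [hw]; rfl
  · rw [List.concat_eq_append] at hw
    rw [hw]
    have hs : PySem.Chars.slice (l ++ [c]) (some (-1)) none = [c] := by
      show PySem.List.slice (l ++ [c]) (some (-1)) none = [c]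
      rw [PySem.List.slice_from_neg_one]
      simp
    rw [hs, List.getLast?_concat]
    have e1 := hofbeq c '!'
    have e2 := hofbeq c '.'
    have e3 := hofbeq c '?'
    simp only [show String.ofList ['!'] = "!" from rfl, show String.ofList ['.'] = "." from rfl,
      show String.ofList ['?'] = "?" from rfl] at e1 e2 e3
    simp [pvPunctC, e1, e2, e3]

lemma pvFixGroup_cons (h : String) (t : List String) :
    pvFixGroup (h :: t) = pvCap (pvIfix h) :: t.map pvIfix := rfl

-- the sentence-start fold: flag = "predecessor ended a sentence"
def pvSentAux : Bool → List String → List String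
  | _, [] => []
  | b, w :: rest => (if b then pvCap (pvIfix w) else pvIfix w) :: pvSentAux (pvPunct w) rest

lemma pvSentAux_eq (ws : List String) : ∀ b : Bool,
    pvSentAux b ws = (ws.zip (b :: ws.dropLast.map pvPunct)).map
      (fun p => (fun w => if p.2 then pvCap w else w) (if p.1 == "i" then "I" else p.1)) := by
  induction ws with
  | nil => intro b; rfl
  | cons w rest ih =>
    intro b
    cases rest with
    | nil => cases b <;> simp [pvSentAux, pvIfix]
    | cons x rs =>
      have hdl : (w :: x :: rs).dropLast = w :: (x :: rs).dropLast := rfl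
      rw [hdl]
      simp only [List.map_cons, List.zip_cons_cons, List.map_cons]
      rw [show pvSentAux b (w :: x :: rs)
            = (if b then pvCap (pvIfix w) else pvIfix w) :: pvSentAux (pvPunct w) (x :: rs) from rfl,
          ih (pvPunct w)]
      cases b <;> simp [pvIfix]

lemma pvMid_eq_pvSentAux (ws : List String) : pvMid ws = pvSentAux true ws := by
  rw [pvSentAux_eq ws true]; rfl

-- B's grouping, flattened after the per-group fix, is exactly the sentence-start fold
lemma pvGroups_flatten (ws : List String) :
    (∀ h t, ((pvGroups ws (h :: t)).map pvFixGroup).flatten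
        = pvCap (pvIfix h) :: (t.map pvIfix ++ pvSentAux false ws))
    ∧ ((pvGroups ws []).map pvFixGroup).flatten = pvSentAux true ws := by
  induction ws with
  | nil =>
    constructor
    · intro h t
      show ((if (h :: t).isEmpty then ([] : List (List String)) else [h :: t]).map
        pvFixGroup).flatten = _
      simp [pvFixGroup_cons, pvSentAux]
    · rfl
  | cons w rest ih =>
    have hrec1 : ∀ (h : String) (t : List String), pvGroups (w :: rest) (h :: t)
        = if pvEnds w then ((h :: t) ++ [w]) :: pvGroups rest []
          else pvGroups rest ((h :: t) ++ [w]) := fun _ _ => rfl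
    have hrec0 : pvGroups (w :: rest) []
        = if pvEnds w then ([] ++ [w]) :: pvGroups rest [] else pvGroups rest ([] ++ [w]) := rfl
    constructor
    · intro h t
      rw [hrec1, pvEnds_eq]
      by_cases hp : pvPunct w = true
      · rw [if_pos hp]
        simp only [List.map_cons, List.flatten_cons, ih.2]
        rw [show (h :: t) ++ [w] = h :: (t ++ [w]) from rfl, pvFixGroup_cons]
        simp [pvSentAux, hp]
      · rw [if_neg hp]
        rw [show (h :: t) ++ [w] = h :: (t ++ [w]) from rfl, (ih.1 h (t ++ [w]))]
        have hpb : pvPunct w = false := by revert hp; cases pvPunct w <;> simp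
        simp [pvSentAux, hpb]
    · rw [hrec0, pvEnds_eq]
      by_cases hp : pvPunct w = true
      · rw [if_pos hp]
        simp only [List.nil_append, List.map_cons, List.flatten_cons, ih.2, pvFixGroup_cons]
        simp [pvSentAux, hp]
      · rw [if_neg hp, List.nil_append, ih.1 w []]
        have hpb : pvPunct w = false := by revert hp; cases pvPunct w <;> simp
        simp [pvSentAux, hpb]

lemma pvGroups_ne_nil : ∀ (ws cur : List String) (g : List String),
    g ∈ pvGroups ws cur → g ≠ [] := by
  intro ws
  induction ws with
  | nil =>
    intro cur g hg
    rw [show pvGroups [] cur = if cur.isEmpty then [] else [cur] from rfl] at hg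
    by_cases hc : cur.isEmpty = true
    · rw [if_pos hc] at hg
      exact absurd hg (by simp)
    · rw [if_neg hc] at hg
      rcases List.mem_singleton.mp hg with rfl
      intro he; rw [he] at hc; exact hc rfl
  | cons w rest ih =>
    intro cur g hg
    rw [show pvGroups (w :: rest) cur = if pvEnds w then (cur ++ [w]) :: pvGroups rest []
        else pvGroups rest (cur ++ [w]) from rfl] at hg
    by_cases hp : pvEnds w = true
    · rw [if_pos hp] at hg
      rcases List.mem_cons.mp hg with rfl | hg'
      · simp
      · exact ih [] g hg'
    · rw [if_neg hp] at hg
      exact ih (cur ++ [w]) g hg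

-- sep.join over nonempty pieces concatenates: first an append law, then the map form
lemma pvJoin_append (sep : List Char) (m : List (List Char)) (hm : m ≠ []) :
    ∀ g : List (List Char), g ≠ [] →
      PySem.Chars.join sep (g ++ m) = PySem.Chars.join sep g ++ sep ++ PySem.Chars.join sep m := by
  intro g
  induction g with
  | nil => intro h; exact absurd rfl h
  | cons a g' ih =>
    intro _
    cases g' with
    | nil =>
      cases m with
      | nil => exact absurd rfl hm
      | cons b ms =>
        rw [List.singleton_append, PySem.Chars.join_cons_cons, PySem.Chars.join_singleton]
    | cons b g'' =>
      rw [show (a :: b :: g'') ++ m = a :: b :: (g'' ++ m) from rfl,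
          PySem.Chars.join_cons_cons,
          show (b :: (g'' ++ m)) = (b :: g'') ++ m from rfl,
          ih (by simp),
          PySem.Chars.join_cons_cons sep a b g'']
      simp [List.append_assoc]

lemma pvJoinMap (sep : List Char) : ∀ gs : List (List (List Char)), (∀ g ∈ gs, g ≠ []) →
    PySem.Chars.join sep (gs.map (PySem.Chars.join sep)) = PySem.Chars.join sep gs.flatten := by
  intro gs
  induction gs with
  | nil => intro _; rfl
  | cons g gs' ih =>
    intro hne
    cases gs' with
    | nil => simp [PySem.Chars.join_singleton]
    | cons g2 gs'' =>
      have hg : g ≠ [] := hne g List.mem_cons_self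
      have hm : (g2 :: gs'').flatten ≠ [] := by
        rw [List.flatten_cons]
        have hg2 : g2 ≠ [] := hne g2 (List.mem_cons_of_mem _ List.mem_cons_self)
        cases g2 with
        | nil => exact absurd rfl hg2
        | cons x xs => simp
      rw [List.map_cons, List.map_cons, PySem.Chars.join_cons_cons, ← List.map_cons,
          ih (fun x hx => hne x (List.mem_cons_of_mem _ hx)),
          show (g :: g2 :: gs'').flatten = g ++ (g2 :: gs'').flatten from rfl,
          pvJoin_append sep _ hm g hg]

-- ===== VERDICT (by name: the statement is the Claim_ definition above) =====
theorem fix_sentence_mechanics_spec : Claim_equal_fix_sentence_mechanics := by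
  intro line _ _
  unfold Spec_fix_sentence_mechanics fix_sentence_mechanics fix_sentence_mechanics_alt
  generalize (PySem.Str.split? line " ").getD [] = ws
  unfold PySem.Str.join
  apply congrArg String.ofList
  have hne : ∀ x ∈ (pvGroups ws []).map (fun g => (pvFixGroup g).map String.toList),
      x ≠ ([] : List (List Char)) := by
    intro x hx
    rcases List.mem_map.mp hx with ⟨g, hg, rfl⟩
    have := pvGroups_ne_nil ws [] g hg
    cases g with
    | nil => exact absurd rfl this
    | cons h t => simp [pvFixGroup_cons]
  rw [List.map_map]
  simp only [Function.comp_def, String.toList_ofList]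
  rw [show (fun g => PySem.Chars.join (" ").toList ((pvFixGroup g).map String.toList))
        = (PySem.Chars.join (" ").toList) ∘ (fun g => (pvFixGroup g).map String.toList) from rfl,
      ← List.map_map, pvJoinMap (" ").toList _ hne,
      show (pvGroups ws []).map (fun g => (pvFixGroup g).map String.toList)
        = ((pvGroups ws []).map pvFixGroup).map (List.map String.toList) from by
          rw [List.map_map]; rfl,
      ← List.map_flatten, (pvGroups_flatten ws).2, ← pvMid_eq_pvSentAux, ← pvAList_eq_pvMid]
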